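-- pv_equiv track=rewrite | github.com/mikeakohn/mandelbrot_sse | msp430/software.py | square
-- ===== SOURCE A (Python) =====
-- def square(a):
--   total = 0
--
--   if (a & 0x8000) != 0:
--     a = (a ^ 0xffff) + 1
--
--   b = a
--
--   while b != 0:
--     if (b & 1) != 0: total += a
--
--     a = a << 1
--     b = b >> 1
--
--   return (total >> 12) & 0xffff
-- ===== SOURCE B (Python) =====
-- def square(a):
--   if (a & 0x8000) != 0:
--     a = (a ^ 0xffff) + 1
--   return (a * a >> 12) & 0xffff
-- ===== Notes on version B (the rewrite author's own statement) =====
-- stated objective: simpler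
-- what changed: Replaces the bit-serial shift-and-add multiplication loop with a single direct multiply a*a, keeping the identical sign-fixup prefix; Pre_ restricts to a >= 0 because A's loop never terminates for negative Python ints (arithmetic right shift never reaches 0).
import Mathlib
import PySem

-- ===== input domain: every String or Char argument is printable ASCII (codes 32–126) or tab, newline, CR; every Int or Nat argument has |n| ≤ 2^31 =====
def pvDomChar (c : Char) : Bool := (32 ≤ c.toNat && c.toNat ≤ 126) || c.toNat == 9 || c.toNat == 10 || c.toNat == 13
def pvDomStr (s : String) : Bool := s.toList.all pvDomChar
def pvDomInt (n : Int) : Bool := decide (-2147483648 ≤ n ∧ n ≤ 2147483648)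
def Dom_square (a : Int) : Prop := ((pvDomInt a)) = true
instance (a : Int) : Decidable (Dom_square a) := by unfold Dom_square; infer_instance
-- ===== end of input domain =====

-- B replaces A's bit-serial shift-and-add multiplication loop with one direct multiply (simpler);
-- Pre_ restricts to 0 ≤ a because A's loop never terminates for negative Python ints.


-- ===== PORT A =====
-- A's while loop; the fuel only makes the recursion total and is sufficient on every
-- input Pre_ admits (0 ≤ b and b.natAbs < 2^fuel), where the loop terminates in Python too.
def squareLoop (fuel : Nat) (a b total : Int) : Int :=
  match fuel with
  | 0 => total
  | fuel + 1 =>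
    if b ≠ 0 then
      squareLoop fuel (a <<< (1:Nat)) (b >>> (1:Nat))
        (if PySem.Int.band b 1 ≠ 0 then total + a else total)
    else total

def square (a : Int) : Int :=
  let total : Int := 0
  let a := if PySem.Int.band a 0x8000 ≠ 0 then (PySem.Int.bxor a 0xffff) + 1 else a
  let b := a
  PySem.Int.band ((squareLoop (b.natAbs + 1) a b total) >>> (12:Nat)) 0xffff

-- ===== PORT B =====
def square_alt (a : Int) : Int :=
  let a := if PySem.Int.band a 0x8000 ≠ 0 then (PySem.Int.bxor a 0xffff) + 1 else a
  PySem.Int.band ((a * a) >>> (12:Nat)) 0xffff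

-- ===== PRECONDITION & SPEC =====
-- A diverges (infinite while loop) for every a < 0: Pre_ admits exactly the inputs where A returns.
def Pre_square (a : Int) : Prop := 0 ≤ a
instance (a : Int) : Decidable (Pre_square a) := by unfold Pre_square; infer_instance
def pvWitness_square : Int := (12345)

def Spec_square (a : Int) (out : Int) : Prop := out = square_alt a
instance (a : Int) (out : Int) : Decidable (Spec_square a out) := by unfold Spec_square; infer_instance

-- ===== CLAIM (what is proved, stated in full; the proofs are below) =====
def Claim_equal_square : Prop := ∀ (a : Int), Dom_square a → Pre_square a → Spec_square a (square a)

-- ===== LEMMAS AND PROOFS =====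

-- The loop computes total + a*b when b ≥ 0 and the fuel covers b's bits.
theorem squareLoop_eq (fuel : Nat) : ∀ (a b total : Int), 0 ≤ b → b.natAbs < 2 ^ fuel →
    squareLoop fuel a b total = total + a * b := by
  induction fuel with
  | zero =>
    intro a b total hb hlt
    have : b = 0 := by omega
    simp [squareLoop, this]
  | succ f ih =>
    intro a b total hb hlt
    by_cases h0 : b = 0
    · simp [squareLoop, h0]
    · have hdiv : b >>> (1:Nat) = b / 2 := by simp [Int.shiftRight_eq_div_pow]
      have hhalf0 : 0 ≤ b / 2 := by positivity
      have hhalf : (b / 2).natAbs < 2 ^ f := by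
        have hp : (2:ℕ)^(f+1) = 2*2^f := by ring
        omega
      have hband : PySem.Int.band b 1 = b % 2 := by
        rw [PySem.Int.band_one]; simp [PySem.Int.mod, Int.fmod_eq_emod]
      have hsl : a <<< (1:Nat) = a * 2 := by simp [Int.shiftLeft_eq]
      have hrec := ih (a <<< (1:Nat)) (b >>> (1:Nat))
        (if PySem.Int.band b 1 ≠ 0 then total + a else total)
        (by rw [hdiv]; exact hhalf0) (by rw [hdiv]; exact hhalf)
      rw [squareLoop, if_pos h0, hrec, hdiv, hsl, hband]
      have hbe : b = 2 * (b / 2) + b % 2 := by omega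
      rcases Int.emod_two_eq_zero_or_one b with h | h <;> rw [h] at hbe <;> simp [h] <;>
        linear_combination (-a) * hbe

theorem fixup_nonneg (a : Int) (h : 0 ≤ a) :
    0 ≤ (if PySem.Int.band a 0x8000 ≠ 0 then (PySem.Int.bxor a 0xffff) + 1 else a) := by
  split_ifs with hb
  · have : 0 ≤ PySem.Int.bxor a 0xffff := by
      rw [PySem.Int.bxor_of_nonneg h (by norm_num)]; positivity
    omega
  · exact h

-- ===== VERDICT (by name: the statement is the Claim_ definition above) =====
theorem square_spec : Claim_equal_square := by
  intro a _ hpre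
  unfold Spec_square square square_alt
  have hfix := fixup_nonneg a hpre
  set a' := if PySem.Int.band a 0x8000 ≠ 0 then (PySem.Int.bxor a 0xffff) + 1 else a with ha'
  have hfuel : a'.natAbs < 2 ^ (a'.natAbs + 1) :=
    Nat.lt_two_pow_self.trans (Nat.pow_lt_pow_right one_lt_two (Nat.lt_succ_self _))
  show PySem.Int.band ((squareLoop (a'.natAbs + 1) a' a' 0) >>> (12:Nat)) 0xffff
      = PySem.Int.band ((a' * a') >>> (12:Nat)) 0xffff
  rw [squareLoop_eq _ a' a' 0 hfix hfuel, zero_add]
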